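-- pv_equiv track=rewrite | github.com/daniel-reich/turbo-robot | hpJsoWBBHWKZ9NcAi_12.py | bird_code
-- ===== SOURCE A (Python) =====
-- def bird_code(lst):
--   outlst = []
--   for x in lst:
--       x = x.replace('-',' ')
--       x = x.split()
--       if len(x) == 1:
--           outlst.append(x[0][:4].upper())
--       elif len(x) == 2:
--           outlst.append(x[0][:2].upper() + x[1][:2].upper())
--       elif len(x) == 3:
--           outlst.append(x[0][:1].upper() + x[1][:1].upper() + x[2][:2].upper())
--       elif len(x) == 4:
--           outlst.append(x[0][:1].upper() + x[1][:1].upper() + x[2][:1].upper() + x[3][:1].upper())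
--   return outlst
-- ===== SOURCE B (Python) =====
-- def bird_code(lst):
--     out = []
--     for name in lst:
--         words = [w.upper() for w in name.replace('-', ' ').split()]
--         k = len(words)
--         if 1 <= k <= 4:
--             q, r = divmod(4, k)
--             out.append(''.join(w[:q] for w in words[:-1]) + words[-1][:q + r])
--     return out
-- ===== Notes on version B (the rewrite author's own statement) =====
-- stated objective: alternative
-- what changed: The four-way if/elif cascade with hand-written per-arity prefix concatenations is replaced by a closed-form rule: uppercase all words once, then compute the prefix lengths arithmetically as q, r = divmod(4, k) and join q-letter prefixes of all but the last word plus a (q+r)-letter prefix of the last.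
import Mathlib
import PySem

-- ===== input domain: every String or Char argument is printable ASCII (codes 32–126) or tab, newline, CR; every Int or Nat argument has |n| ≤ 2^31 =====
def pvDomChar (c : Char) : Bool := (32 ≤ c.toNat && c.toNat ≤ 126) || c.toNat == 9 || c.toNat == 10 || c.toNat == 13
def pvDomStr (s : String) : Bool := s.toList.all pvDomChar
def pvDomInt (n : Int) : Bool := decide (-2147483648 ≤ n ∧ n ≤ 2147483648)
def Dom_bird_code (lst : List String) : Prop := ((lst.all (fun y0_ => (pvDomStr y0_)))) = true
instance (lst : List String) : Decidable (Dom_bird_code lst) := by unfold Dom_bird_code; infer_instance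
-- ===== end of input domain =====

-- B replaces A's four-way if/elif cascade by a closed arithmetic rule: uppercase all words
-- once, then take q = 4 // k letters of each word and the 4 % k leftover letters on the last.
-- Objective: alternative decomposition, same cost.

-- ===== PORT A =====
def bird_code (lst : List String) : List String :=
  lst.foldl (fun outlst x =>
    let x1 := PySem.Str.replace x "-" " "
    let xs := PySem.Str.split₀ x1
    if xs.length = 1 then
      outlst ++ [PySem.Str.upper (PySem.Str.slice (PySem.List.pyGetD xs 0 "") none (some 4))]
    else if xs.length = 2 then
      outlst ++ [PySem.Str.upper (PySem.Str.slice (PySem.List.pyGetD xs 0 "") none (some 2)) ++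
                 PySem.Str.upper (PySem.Str.slice (PySem.List.pyGetD xs 1 "") none (some 2))]
    else if xs.length = 3 then
      outlst ++ [PySem.Str.upper (PySem.Str.slice (PySem.List.pyGetD xs 0 "") none (some 1)) ++
                 PySem.Str.upper (PySem.Str.slice (PySem.List.pyGetD xs 1 "") none (some 1)) ++
                 PySem.Str.upper (PySem.Str.slice (PySem.List.pyGetD xs 2 "") none (some 2))]
    else if xs.length = 4 then
      outlst ++ [PySem.Str.upper (PySem.Str.slice (PySem.List.pyGetD xs 0 "") none (some 1)) ++
                 PySem.Str.upper (PySem.Str.slice (PySem.List.pyGetD xs 1 "") none (some 1)) ++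
                 PySem.Str.upper (PySem.Str.slice (PySem.List.pyGetD xs 2 "") none (some 1)) ++
                 PySem.Str.upper (PySem.Str.slice (PySem.List.pyGetD xs 3 "") none (some 1))]
    else outlst) []

-- ===== PORT B =====
def bird_code_alt (lst : List String) : List String :=
  lst.foldl (fun out name =>
    let words := (PySem.Str.split₀ (PySem.Str.replace name "-" " ")).map PySem.Str.upper
    let k := PySem.List.len words
    if 1 ≤ k ∧ k ≤ 4 then
      let q := PySem.Int.floordiv 4 k
      let r := PySem.Int.mod 4 k
      out ++ [PySem.Str.join "" ((PySem.List.slice words none (some (-1))).map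
                (fun w => PySem.Str.slice w none (some q))) ++
              PySem.Str.slice ((PySem.List.pyGet? words (-1)).getD "") none (some (q + r))]
    else out) []

-- ===== PRECONDITION & SPEC =====
def Spec_bird_code (lst : List String) (out : List String) : Prop := out = bird_code_alt lst
instance (lst : List String) (out : List String) : Decidable (Spec_bird_code lst out) := by unfold Spec_bird_code; infer_instance

-- ===== CLAIM =====
def Claim_equal_bird_code : Prop := ∀ (lst : List String), Dom_bird_code lst → Spec_bird_code lst (bird_code lst)

-- ===== LEMMAS AND PROOFS =====

-- slicing a prefix commutes with uppercasing (both are char-wise map / take)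
-- A's branch result equals B's divmod-driven result for one name, given its word list ws.
lemma step_eq (out : List String) (ws : List String) :
    (if ws.length = 1 then
      out ++ [PySem.Str.upper (PySem.Str.slice (PySem.List.pyGetD ws 0 "") none (some 4))]
    else if ws.length = 2 then
      out ++ [PySem.Str.upper (PySem.Str.slice (PySem.List.pyGetD ws 0 "") none (some 2)) ++
              PySem.Str.upper (PySem.Str.slice (PySem.List.pyGetD ws 1 "") none (some 2))]
    else if ws.length = 3 then
      out ++ [PySem.Str.upper (PySem.Str.slice (PySem.List.pyGetD ws 0 "") none (some 1)) ++
              PySem.Str.upper (PySem.Str.slice (PySem.List.pyGetD ws 1 "") none (some 1)) ++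
              PySem.Str.upper (PySem.Str.slice (PySem.List.pyGetD ws 2 "") none (some 2))]
    else if ws.length = 4 then
      out ++ [PySem.Str.upper (PySem.Str.slice (PySem.List.pyGetD ws 0 "") none (some 1)) ++
              PySem.Str.upper (PySem.Str.slice (PySem.List.pyGetD ws 1 "") none (some 1)) ++
              PySem.Str.upper (PySem.Str.slice (PySem.List.pyGetD ws 2 "") none (some 1)) ++
              PySem.Str.upper (PySem.Str.slice (PySem.List.pyGetD ws 3 "") none (some 1))]
    else out) =
    (let words := ws.map PySem.Str.upper
     let k := PySem.List.len words
     if 1 ≤ k ∧ k ≤ 4 then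
       let q := PySem.Int.floordiv 4 k
       let r := PySem.Int.mod 4 k
       out ++ [PySem.Str.join "" ((PySem.List.slice words none (some (-1))).map
                 (fun w => PySem.Str.slice w none (some q))) ++
               PySem.Str.slice ((PySem.List.pyGet? words (-1)).getD "") none (some (q + r))]
     else out) := by
  match ws with
  | [] => rfl
  | [a] =>
      simp only [List.length_cons, List.length_nil]
      norm_num
      apply String.toList_inj.mp
      simp [PySem.List.slice_to_neg_one, PySem.List.pyGet?, PySem.List.pyIdx?,
            PySem.Str.toList_slice, PySem.Str.toList_upper, PySem.Str.toList_join,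
            PySem.Chars.join, PySem.Chars.slice, PySem.Chars.upper, PySem.List.slice_to,
            List.map_take, List.intercalate]
  | [a, b] =>
      simp only [List.length_cons, List.length_nil]
      norm_num
      apply String.toList_inj.mp
      simp [PySem.List.slice_to_neg_one, PySem.List.pyGetD, PySem.List.pyGet?, PySem.List.pyIdx?,
            PySem.Str.toList_slice, PySem.Str.toList_upper, PySem.Str.toList_join,
            PySem.Chars.join, PySem.Chars.slice, PySem.Chars.upper, PySem.List.slice_to,
            List.map_take, List.intercalate]
  | [a, b, c] =>
      simp only [List.length_cons, List.length_nil]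
      norm_num
      apply String.toList_inj.mp
      simp [PySem.List.slice_to_neg_one, PySem.List.pyGetD, PySem.List.pyGet?, PySem.List.pyIdx?,
            PySem.Str.toList_slice, PySem.Str.toList_upper, PySem.Str.toList_join,
            PySem.Chars.join, PySem.Chars.slice, PySem.Chars.upper, PySem.List.slice_to,
            List.map_take, List.intercalate]
  | [a, b, c, d] =>
      simp only [List.length_cons, List.length_nil]
      norm_num
      apply String.toList_inj.mp
      simp [PySem.List.slice_to_neg_one, PySem.List.pyGetD, PySem.List.pyGet?, PySem.List.pyIdx?,
            PySem.Str.toList_slice, PySem.Str.toList_upper, PySem.Str.toList_join,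
            PySem.Chars.join, PySem.Chars.slice, PySem.Chars.upper, PySem.List.slice_to,
            List.map_take, List.intercalate]
  | a :: b :: c :: d :: e :: rest =>
      have hk : ¬ (1 ≤ PySem.List.len ((a :: b :: c :: d :: e :: rest).map PySem.Str.upper) ∧
                   PySem.List.len ((a :: b :: c :: d :: e :: rest).map PySem.Str.upper) ≤ 4) := by
        simp [PySem.List.len_eq]; omega
      simp only [hk, if_false]
      simp only [List.length_cons]
      split_ifs <;> first | omega | rfl

-- ===== VERDICT =====
theorem bird_code_spec : Claim_equal_bird_code := by
  intro lst _
  unfold Spec_bird_code bird_code bird_code_alt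
  apply PySem.List.foldl_congr_mem
  intro out x _
  exact step_eq out (PySem.Str.split₀ (PySem.Str.replace x "-" " "))
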